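-- pv_equiv track=rewrite | github.com/belesev/LeetCode | Problem33.py | get_pivot_point
-- ===== SOURCE A (Python) =====
-- from typing import List
--
-- def get_pivot_point(nums: List[int]):
--     i = 0
--     pivot_point = -1
--
--     # looking for pivot_point, the last increasing element before drop down
--     while i < len(nums) - 1:
--         if nums[i] > nums[i + 1]:
--             pivot_point = i
--             break
--         i += 1
--     return pivot_point
-- ===== SOURCE B (Python) =====
-- def get_pivot_point(nums):
--     # Divide and conquer: first adjacent descent in [lo, hi) of the left half,
--     # else of the right half; descents live at indices 0 .. len(nums)-2.
--     def solve(lo, hi):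
--         if hi - lo < 1:
--             return -1
--         if hi - lo == 1:
--             return lo if nums[lo] > nums[lo + 1] else -1
--         mid = (lo + hi) // 2
--         left = solve(lo, mid)
--         return left if left != -1 else solve(mid, hi)
--     return solve(0, len(nums) - 1)
-- ===== Notes on version B (the rewrite author's own statement) =====
-- stated objective: alternative
-- what changed: Replaces A's index-incrementing while loop with sentinel/break by a recursive divide-and-conquer: split the descent-index range in half, take the leftmost descent of the left half, else of the right half.
import Mathlib
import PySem

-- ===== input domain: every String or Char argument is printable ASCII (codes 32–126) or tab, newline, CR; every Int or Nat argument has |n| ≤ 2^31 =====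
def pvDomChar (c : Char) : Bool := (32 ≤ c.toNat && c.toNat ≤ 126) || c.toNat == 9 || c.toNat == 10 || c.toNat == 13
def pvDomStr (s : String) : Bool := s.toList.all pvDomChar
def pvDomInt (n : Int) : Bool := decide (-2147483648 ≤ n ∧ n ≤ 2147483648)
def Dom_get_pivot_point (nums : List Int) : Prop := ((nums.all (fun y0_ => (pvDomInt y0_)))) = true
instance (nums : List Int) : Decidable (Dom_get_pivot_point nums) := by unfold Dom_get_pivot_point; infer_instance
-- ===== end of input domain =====

-- B replaces A's sentinel while loop by a recursive divide-and-conquer over the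
-- index range (leftmost descent of the left half, else of the right half); equal on all inputs.


-- ===== PORT A =====
-- the while loop: i counts up, returns i at the first descent, else -1 (the sentinel)
def pvALoop (nums : List Int) (i : Nat) : Int :=
  if i + 1 < nums.length then           -- i < len(nums) - 1
    if nums.getD i 0 > nums.getD (i + 1) 0 then (i : Int)   -- pivot_point = i; break
    else pvALoop nums (i + 1)
  else -1
termination_by nums.length - i

def get_pivot_point (nums : List Int) : Int := pvALoop nums 0

-- ===== PORT B =====
-- solve(lo, hi): first descent index in [lo, hi), divide and conquer.
-- fuel makes the recursion structural; fuel = (hi - lo).toNat at the top call always suffices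
-- (each half-range is strictly shorter), so the fuel-out branch is never taken.
-- nums[lo] / nums[lo+1] are in range whenever reached (0 ≤ lo, lo+1 ≤ len-1), so .getD 0 is never taken.
def pvSolve (nums : List Int) : Nat → Int → Int → Int
  | 0, _, _ => -1
  | fuel + 1, lo, hi =>
    if hi - lo < 1 then -1
    else if hi - lo = 1 then
      if (PySem.List.pyGet? nums lo).getD 0 > (PySem.List.pyGet? nums (lo + 1)).getD 0 then lo else -1
    else
      let mid := PySem.Int.floordiv (lo + hi) 2
      let left := pvSolve nums fuel lo mid
      if left ≠ -1 then left else pvSolve nums fuel mid hi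

def get_pivot_point_alt (nums : List Int) : Int :=
  pvSolve nums ((nums.length : Int) - 1).toNat 0 ((nums.length : Int) - 1)

-- ===== PRECONDITION & SPEC =====
def Spec_get_pivot_point (nums : List Int) (out : Int) : Prop := out = get_pivot_point_alt nums
instance (nums : List Int) (out : Int) : Decidable (Spec_get_pivot_point nums out) := by unfold Spec_get_pivot_point; infer_instance

-- ===== CLAIM (what is proved, stated in full; the proofs are below) =====
def Claim_equal_get_pivot_point : Prop := ∀ (nums : List Int), Dom_get_pivot_point nums → Spec_get_pivot_point nums (get_pivot_point nums)

-- ===== LEMMAS AND PROOFS =====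
-- proof-only helper: linear scan over the same Int index range as pvSolve
def pvLin (nums : List Int) (lo hi : Int) : Int :=
  if hi - lo < 1 then -1
  else if (PySem.List.pyGet? nums lo).getD 0 > (PySem.List.pyGet? nums (lo + 1)).getD 0 then lo
  else pvLin nums (lo + 1) hi
termination_by (hi - lo).toNat
decreasing_by omega

theorem pvLin_merge (nums : List Int) (lo mid hi : Int) (h0 : 0 ≤ lo)
    (h1 : lo ≤ mid) (h2 : mid ≤ hi) :
    pvLin nums lo hi = (if pvLin nums lo mid ≠ -1 then pvLin nums lo mid else pvLin nums mid hi) := by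
  by_cases hml : mid - lo < 1
  · have hlo : mid = lo := by omega
    subst hlo
    have e0 : pvLin nums mid mid = -1 := by rw [pvLin]; simp
    simp [e0]
  · have e1 : pvLin nums lo hi
        = if (PySem.List.pyGet? nums lo).getD 0 > (PySem.List.pyGet? nums (lo + 1)).getD 0
          then lo else pvLin nums (lo + 1) hi := by
      rw [pvLin]; simp only [if_neg (show ¬ hi - lo < 1 by omega)]
    have e2 : pvLin nums lo mid
        = if (PySem.List.pyGet? nums lo).getD 0 > (PySem.List.pyGet? nums (lo + 1)).getD 0
          then lo else pvLin nums (lo + 1) mid := by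
      rw [pvLin]; simp only [if_neg hml]
    rw [e1, e2]
    by_cases hgt : (PySem.List.pyGet? nums lo).getD 0 > (PySem.List.pyGet? nums (lo + 1)).getD 0
    · simp [hgt, show lo ≠ -1 by omega]
    · simp only [if_neg hgt]
      exact pvLin_merge nums (lo + 1) mid hi (by omega) (by omega) h2
termination_by (mid - lo).toNat
decreasing_by omega

theorem pvSolve_eq_pvLin (nums : List Int) (fuel : Nat) (lo hi : Int) (h0 : 0 ≤ lo)
    (hf : (hi - lo).toNat ≤ fuel) :
    pvSolve nums fuel lo hi = pvLin nums lo hi := by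
  induction fuel generalizing lo hi with
  | zero =>
    rw [pvSolve, pvLin]
    simp [show hi - lo < 1 by omega]
  | succ fuel ih =>
  rw [pvSolve]
  by_cases hb : hi - lo < 1
  · rw [pvLin]; simp [hb]
  · by_cases h1 : hi - lo = 1
    · have e1 : pvLin nums lo hi
          = if (PySem.List.pyGet? nums lo).getD 0 > (PySem.List.pyGet? nums (lo + 1)).getD 0
            then lo else pvLin nums (lo + 1) hi := by
        rw [pvLin]; simp only [if_neg hb]
      have e0 : pvLin nums (lo + 1) hi = -1 := by
        rw [pvLin]; simp [show hi - (lo + 1) < 1 by omega]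
      simp only [if_neg hb, if_pos h1, e1, e0]
    · simp only [if_neg hb, if_neg h1]

      have hm : lo + 1 ≤ PySem.Int.floordiv (lo + hi) 2 ∧ PySem.Int.floordiv (lo + hi) 2 ≤ hi - 1 := by
        have h := PySem.Int.floordiv_two_mid_bounds (lo := lo + 1) (hi := hi - 1) (by omega)
        rwa [show lo + 1 + (hi - 1) = lo + hi by ring] at h
      rw [ih lo (PySem.Int.floordiv (lo + hi) 2) h0 (by omega),
          ih (PySem.Int.floordiv (lo + hi) 2) hi (by omega) (by omega)]
      exact (pvLin_merge nums lo (PySem.Int.floordiv (lo + hi) 2) hi h0 (by omega) (by omega)).symm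

theorem pvALoop_eq_pvLin (nums : List Int) (i : Nat) :
    pvALoop nums i = pvLin nums (i : Int) ((nums.length : Int) - 1) := by
  rw [pvALoop, pvLin]
  by_cases h : i + 1 < nums.length
  · simp only [if_pos h, if_neg (show ¬ ((nums.length : Int) - 1 - (i : Int) < 1) by omega)]
    have g1 : PySem.List.pyGet? nums (i : Int) = some (nums.getD i 0) := by
      rw [PySem.List.pyGet?_natCast, List.getElem?_eq_getElem (by omega),
          List.getD_eq_getElem _ _ (by omega)]
    have g2 : PySem.List.pyGet? nums ((i : Int) + 1) = some (nums.getD (i + 1) 0) := by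
      rw [show ((i : Int) + 1) = ((i + 1 : Nat) : Int) by push_cast ; ring_nf,
          PySem.List.pyGet?_natCast, List.getElem?_eq_getElem h, List.getD_eq_getElem _ _ h]
    rw [g1, g2]
    simp only [Option.getD_some]
    split_ifs with hgt
    · rfl
    · rw [pvALoop_eq_pvLin nums (i + 1)]
      push_cast
      ring_nf
  · simp only [if_neg h, if_pos (show (nums.length : Int) - 1 - (i : Int) < 1 by omega)]
termination_by nums.length - i
decreasing_by omega

-- ===== VERDICT (by name: the statement is the Claim_ definition above) =====
theorem get_pivot_point_spec : Claim_equal_get_pivot_point := by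
  intro nums _
  unfold Spec_get_pivot_point get_pivot_point get_pivot_point_alt
  rw [pvALoop_eq_pvLin nums 0, pvSolve_eq_pvLin nums _ 0 _ (by omega) (by omega)]
  norm_num
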